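-- pv_equiv track=rewrite | github.com/Benchwise/benchwise | tests/test_docs_examples.py | prepare_code_for_testing
-- ===== SOURCE A (Python) =====
-- def prepare_code_for_testing(code: str) -> str:
--     """
--     Prepare documentation code for testing by replacing real models with mocks.
--     """
--     model_replacements = {
--         '"gpt-4"': '"mock-gpt-4"',
--         '"gpt-3.5-turbo"': '"mock-gpt-3.5"',
--         '"gpt-4o-mini"': '"mock-gpt-4o-mini"',
--         '"claude-3-opus"': '"mock-claude-opus"',
--         '"claude-3-sonnet"': '"mock-claude-sonnet"',
--         '"claude-3-5-sonnet-20241022"': '"mock-claude-sonnet"',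
--         '"claude-3-haiku"': '"mock-claude-haiku"',
--         '"claude-3-5-haiku-20241022"': '"mock-claude-haiku"',
--         '"claude-opus-4-1"': '"mock-claude-opus"',
--         '"gemini-pro"': '"mock-gemini-pro"',
--     }
--
--     modified_code = code
--     for real, mock in model_replacements.items():
--         modified_code = modified_code.replace(real, mock)
--
--     # Replace placeholder dataset loading
--     if 'load_dataset("data/' in modified_code:
--         modified_code = modified_code.replace(
--             'load_dataset("data/qa_1000.json")',
--             'create_qa_dataset(questions=["Q1?"], answers=["A1"], name="test")',
--         )
--         modified_code = modified_code.replace(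
--             'load_dataset("data/news_articles.json")',
--             'create_summarization_dataset(documents=["Doc1"], summaries=["Sum1"], name="news")',
--         )
--
--     return modified_code
-- ===== SOURCE B (Python) =====
-- def prepare_code_for_testing(code: str) -> str:
--     """
--     Prepare documentation code for testing by replacing real models with mocks.
--     """
--     models = {
--         'gpt-4': 'mock-gpt-4',
--         'gpt-3.5-turbo': 'mock-gpt-3.5',
--         'gpt-4o-mini': 'mock-gpt-4o-mini',
--         'claude-3-opus': 'mock-claude-opus',
--         'claude-3-sonnet': 'mock-claude-sonnet',
--         'claude-3-5-sonnet-20241022': 'mock-claude-sonnet',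
--         'claude-3-haiku': 'mock-claude-haiku',
--         'claude-3-5-haiku-20241022': 'mock-claude-haiku',
--         'claude-opus-4-1': 'mock-claude-opus',
--         'gemini-pro': 'mock-gemini-pro',
--     }
--
--     # Every model literal is a quoted string: swap the quoted contents in one pass.
--     parts = code.split('"')
--     for i in range(1, len(parts) - 1):
--         parts[i] = models.get(parts[i], parts[i])
--     result = '"'.join(parts)
--
--     result = result.replace(
--         'load_dataset("data/qa_1000.json")',
--         'create_qa_dataset(questions=["Q1?"], answers=["A1"], name="test")',
--     )
--     result = result.replace(
--         'load_dataset("data/news_articles.json")',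
--         'create_summarization_dataset(documents=["Doc1"], summaries=["Sum1"], name="news")',
--     )
--     return result
-- ===== Notes on version B (the rewrite author's own statement) =====
-- stated objective: alternative
-- what changed: B splits the code on '"' once and mocks each quoted segment that names a real model via one dict lookup (a single structural pass over the quote-segmented string) instead of A's ten sequential full-string str.replace passes, dropping the redundant load_dataset guard; Pre_ excludes inputs where two quoted copies of the same model name share a quote (a substring "x"x"), on which A's sequential replace mocks only every second copy — an overlapping-occurrence artefact of pass order that no caller would specify.
-- outside the precondition, e.g. on prepare_code_for_testing('"gpt-4"gpt-4"'): A returns '"mock-gpt-4"gpt-4"', B returns '"mock-gpt-4"mock-gpt-4"'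
import Mathlib
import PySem

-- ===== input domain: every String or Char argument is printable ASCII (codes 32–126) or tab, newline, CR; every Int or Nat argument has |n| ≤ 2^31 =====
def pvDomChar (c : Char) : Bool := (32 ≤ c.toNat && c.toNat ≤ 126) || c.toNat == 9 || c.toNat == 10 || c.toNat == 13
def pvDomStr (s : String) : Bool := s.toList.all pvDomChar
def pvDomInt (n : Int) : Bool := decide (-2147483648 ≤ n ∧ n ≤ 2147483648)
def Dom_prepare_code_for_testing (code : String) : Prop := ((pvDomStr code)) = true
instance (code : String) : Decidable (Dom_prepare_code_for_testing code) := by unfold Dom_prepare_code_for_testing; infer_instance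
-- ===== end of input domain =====

-- B splits the code on '"' once and mocks each quoted model name by one dict lookup (one structural
-- pass over the quote-segmented string) instead of A's ten sequential full-string replace passes;
-- on back-to-back quoted copies of the same model name, where the passes disagree, Pre_ excludes
-- the input (see the Pre_ comment).

-- ===== PORT A =====
-- model_replacements: dict[str,str] as an association list in insertion order; the loop iterates its items
def pvModelItems : List (String × String) :=
  [
   ("\"gpt-4\"", "\"mock-gpt-4\""),
   ("\"gpt-3.5-turbo\"", "\"mock-gpt-3.5\""),
   ("\"gpt-4o-mini\"", "\"mock-gpt-4o-mini\""),
   ("\"claude-3-opus\"", "\"mock-claude-opus\""),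
   ("\"claude-3-sonnet\"", "\"mock-claude-sonnet\""),
   ("\"claude-3-5-sonnet-20241022\"", "\"mock-claude-sonnet\""),
   ("\"claude-3-haiku\"", "\"mock-claude-haiku\""),
   ("\"claude-3-5-haiku-20241022\"", "\"mock-claude-haiku\""),
   ("\"claude-opus-4-1\"", "\"mock-claude-opus\""),
   ("\"gemini-pro\"", "\"mock-gemini-pro\"")]

def prepare_code_for_testing (code : String) : String :=
  let modified := pvModelItems.foldl (fun s p => PySem.Str.replace s p.1 p.2) code
  if PySem.Str.isIn "load_dataset(\"data/" modified then
    let m1 := PySem.Str.replace modified "load_dataset(\"data/qa_1000.json\")"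
        "create_qa_dataset(questions=[\"Q1?\"], answers=[\"A1\"], name=\"test\")"
    PySem.Str.replace m1 "load_dataset(\"data/news_articles.json\")"
        "create_summarization_dataset(documents=[\"Doc1\"], summaries=[\"Sum1\"], name=\"news\")"
  else modified


-- ===== PORT B =====
-- models: dict[str,str] of Source B (keys and values kept as their character lists)
def pvModels : PySem.Dict (List Char) (List Char) :=
  ⟨[("gpt-4".toList, "mock-gpt-4".toList),
    ("gpt-3.5-turbo".toList, "mock-gpt-3.5".toList),
    ("gpt-4o-mini".toList, "mock-gpt-4o-mini".toList),
    ("claude-3-opus".toList, "mock-claude-opus".toList),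
    ("claude-3-sonnet".toList, "mock-claude-sonnet".toList),
    ("claude-3-5-sonnet-20241022".toList, "mock-claude-sonnet".toList),
    ("claude-3-haiku".toList, "mock-claude-haiku".toList),
    ("claude-3-5-haiku-20241022".toList, "mock-claude-haiku".toList),
    ("claude-opus-4-1".toList, "mock-claude-opus".toList),
    ("gemini-pro".toList, "mock-gemini-pro".toList)]⟩

def prepare_code_for_testing_alt (code : String) : String :=
  let parts := PySem.Chars.splitOn code.toList "\"".toList
  let parts := (PySem.List.pyRange 1 ((parts.length : Int) - 1) 1).foldl
      (fun ps i => ps.set i.toNat (pvModels.getD (ps.getD i.toNat []) (ps.getD i.toNat []))) parts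
  let result := PySem.Chars.join "\"".toList parts
  let result := PySem.Chars.replace result "load_dataset(\"data/qa_1000.json\")".toList
      "create_qa_dataset(questions=[\"Q1?\"], answers=[\"A1\"], name=\"test\")".toList
  String.ofList (PySem.Chars.replace result "load_dataset(\"data/news_articles.json\")".toList
      "create_summarization_dataset(documents=[\"Doc1\"], summaries=[\"Sum1\"], name=\"news\")".toList)


-- ===== PRECONDITION & SPEC =====
-- Pre_ excludes inputs where two quoted copies of the same model name share a quote (a substring
-- "x"x" with x a model name): there A's sequential replace passes mock only every second copy while
-- B's single pass mocks all of them — an overlapping-occurrence corner that no caller would specify.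
def Pre_prepare_code_for_testing (code : String) : Prop :=
  PySem.Str.isIn "\"gpt-4\"gpt-4\"" code = false ∧
  PySem.Str.isIn "\"gpt-3.5-turbo\"gpt-3.5-turbo\"" code = false ∧
  PySem.Str.isIn "\"gpt-4o-mini\"gpt-4o-mini\"" code = false ∧
  PySem.Str.isIn "\"claude-3-opus\"claude-3-opus\"" code = false ∧
  PySem.Str.isIn "\"claude-3-sonnet\"claude-3-sonnet\"" code = false ∧
  PySem.Str.isIn "\"claude-3-5-sonnet-20241022\"claude-3-5-sonnet-20241022\"" code = false ∧
  PySem.Str.isIn "\"claude-3-haiku\"claude-3-haiku\"" code = false ∧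
  PySem.Str.isIn "\"claude-3-5-haiku-20241022\"claude-3-5-haiku-20241022\"" code = false ∧
  PySem.Str.isIn "\"claude-opus-4-1\"claude-opus-4-1\"" code = false ∧
  PySem.Str.isIn "\"gemini-pro\"gemini-pro\"" code = false
instance (code : String) : Decidable (Pre_prepare_code_for_testing code) := by
  unfold Pre_prepare_code_for_testing; infer_instance

def pvWitness_prepare_code_for_testing : String :=
  "results = evaluate(\"gpt-4\", load_dataset(\"data/qa_1000.json\"))"

def Spec_prepare_code_for_testing (code : String) (out : String) : Prop :=
  out = prepare_code_for_testing_alt code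
instance (code : String) (out : String) : Decidable (Spec_prepare_code_for_testing code out) := by
  unfold Spec_prepare_code_for_testing; infer_instance

-- ===== CLAIM =====
def Claim_equal_prepare_code_for_testing : Prop :=
  ∀ (code : String), Dom_prepare_code_for_testing code →
    Pre_prepare_code_for_testing code →
    Spec_prepare_code_for_testing code (prepare_code_for_testing code)

-- ===== LEMMAS AND PROOFS =====
def pvSubGo (old new : List Char) : Nat → List Char → List Char
  | _, [] => []
  | 0, _ :: _ => []
  | fuel + 1, c :: cs =>
    if PySem.Chars.startswith (c :: cs) old then new ++ pvSubGo old new fuel (cs.drop (old.length - 1))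
    else c :: pvSubGo old new fuel cs

def pvSub (old new l : List Char) : List Char :=
  pvSubGo old new l.length l

lemma pvSubGo_fuel (old new : List Char) :
    ∀ (f g : Nat) (l : List Char), l.length ≤ f → l.length ≤ g →
      pvSubGo old new f l = pvSubGo old new g l := by
  intro f
  induction f with
  | zero =>
    intro g l hf _
    have : l = [] := List.eq_nil_of_length_eq_zero (Nat.le_zero.mp hf)
    subst this
    cases g <;> rfl
  | succ f ih =>
    intro g l hf hg
    cases l with
    | nil => cases g <;> rfl
    | cons c cs =>
      cases g with
      | zero => simp at hg
      | succ g =>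
        simp only [pvSubGo]
        simp only [List.length_cons] at hf hg
        by_cases hpre : PySem.Chars.startswith (c :: cs) old = true
        · rw [if_pos hpre, if_pos hpre,
            ih g _ (by simp only [List.length_drop]; omega) (by simp only [List.length_drop]; omega)]
        · rw [if_neg hpre, if_neg hpre, ih g cs (by omega) (by omega)]

lemma pvSub_nil (old new : List Char) : pvSub old new [] = [] := rfl

lemma pvSub_cons_pos {old : List Char} (new : List Char) {c : Char} {cs : List Char}
    (h : PySem.Chars.startswith (c :: cs) old = true) :
    pvSub old new (c :: cs) = new ++ pvSub old new (cs.drop (old.length - 1)) := by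
  unfold pvSub
  simp only [List.length_cons, pvSubGo, if_pos h]
  rw [pvSubGo_fuel old new cs.length _ _ (by simp only [List.length_drop]; omega) le_rfl]

lemma pvSub_cons_neg {old : List Char} (new : List Char) {c : Char} {cs : List Char}
    (h : ¬ PySem.Chars.startswith (c :: cs) old = true) :
    pvSub old new (c :: cs) = c :: pvSub old new cs := by
  unfold pvSub
  simp only [List.length_cons, pvSubGo, if_neg h]

lemma pv_replace_go_eq (old new : List Char) (hold : old ≠ []) :
    ∀ (fuel : Nat) (l acc : List Char), l.length ≤ fuel →
      PySem.Chars.replace.go old new fuel l acc = acc.reverse ++ pvSub old new l := by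
  intro fuel
  induction fuel with
  | zero =>
    intro l acc hl
    have : l = [] := List.eq_nil_of_length_eq_zero (Nat.le_zero.mp hl)
    subst this
    simp [PySem.Chars.replace.go, pvSub_nil]
  | succ fuel ih =>
    intro l acc hl
    cases l with
    | nil => simp [PySem.Chars.replace.go, pvSub_nil]
    | cons c t =>
      by_cases hpre : old.isPrefixOf (c :: t)
      · obtain ⟨m, hm⟩ : ∃ m, old.length = m + 1 := by
          cases old with
          | nil => exact absurd rfl hold
          | cons a b => exact ⟨b.length, rfl⟩
        have hdrop : List.drop old.length (c :: t) = t.drop (old.length - 1) := by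
          rw [hm]; simp [List.drop_succ_cons]
        rw [PySem.Chars.replace.go, if_pos hpre, hdrop]
        rw [ih _ _ (by simp only [List.length_drop]; simp at hl; omega)]
        rw [pvSub_cons_pos new (by simpa [PySem.Chars.startswith] using hpre)]
        simp
      · rw [PySem.Chars.replace.go, if_neg hpre]
        rw [ih _ _ (by simp at hl ⊢; omega)]
        rw [pvSub_cons_neg new (by simpa [PySem.Chars.startswith] using hpre)]
        simp

lemma pv_replace_eq_pvSub (old new : List Char) (hold : old ≠ []) (s : List Char) :
    PySem.Chars.replace s old new = pvSub old new s := by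
  unfold PySem.Chars.replace
  rw [if_neg (by simp [List.isEmpty_iff]; exact hold)]
  simpa using pv_replace_go_eq old new hold s.length s [] le_rfl

lemma pvSub_id_of_not_infix (old new : List Char) :
    ∀ (l : List Char), ¬ old <:+: l → pvSub old new l = l := by
  intro l
  induction l with
  | nil => intro _; exact pvSub_nil _ _
  | cons c cs ih =>
    intro h
    have hpre : ¬ PySem.Chars.startswith (c :: cs) old = true := by
      simp only [PySem.Chars.startswith_iff]
      intro hp
      exact h hp.isInfix
    rw [pvSub_cons_neg new hpre, ih (fun h' => h (List.infix_cons h'))]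

lemma pv_foldl_replace : ∀ (items : List (String × String)) (code : String),
    (∀ p ∈ items, p.1.toList ≠ []) →
    (items.foldl (fun s p => PySem.Str.replace s p.1 p.2) code).toList
      = items.foldl (fun l p => pvSub p.1.toList p.2.toList l) code.toList := by
  intro items
  induction items with
  | nil => intro code _; rfl
  | cons p items ih =>
    intro code h
    simp only [List.foldl_cons]
    rw [ih _ (fun q hq => h q (List.mem_cons_of_mem _ hq))]
    congr 1
    rw [PySem.Str.toList_replace]
    exact pv_replace_eq_pvSub _ _ (h p (by simp)) _

-- ---- new: quote lemmas ----
lemma pvSub_skip {k : List Char} (v : List Char) :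
    ∀ (s m : List Char), '"' ∉ s → pvSub ('"' :: k) v (s ++ m) = s ++ pvSub ('"' :: k) v m := by
  intro s
  induction s with
  | nil => intro m _; rfl
  | cons c cs ih =>
    intro m hq
    have hc : c ≠ '"' := by intro h; exact hq (by simp [h])
    have hpre : ¬ PySem.Chars.startswith (c :: (cs ++ m)) ('"' :: k) = true := by
      simp only [PySem.Chars.startswith_iff]
      intro hp
      rcases hp with ⟨t, ht⟩
      have := congrArg (·.head?) ht
      simp at this
      exact hc this.symm
    rw [List.cons_append, pvSub_cons_neg v hpre, ih m (fun h => hq (List.mem_cons_of_mem _ h))]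
    simp

lemma pvSub_qfree_id {k : List Char} (v : List Char) (s : List Char) (hq : '"' ∉ s) :
    pvSub ('"' :: k) v s = s := by
  have := pvSub_skip (k := k) v s [] hq
  simpa [pvSub_nil] using this

lemma qfree_no_prefix {x t : List Char} (ht : '"' ∉ t) : ¬ ((x ++ ['"']) <+: t) := by
  intro h
  exact ht (h.sublist.mem (by simp))

lemma qfree_prefix_iff {x t : List Char} (m : List Char) (hx : '"' ∉ x) (ht : '"' ∉ t) :
    ((x ++ ['"']) <+: (t ++ '"' :: m)) ↔ x = t := by
  induction x generalizing t with
  | nil =>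
    cases t with
    | nil => simp
    | cons c t' =>
      simp only [List.nil_append]
      constructor
      · intro h
        rcases h with ⟨r, hr⟩
        have := congrArg (·.head?) hr
        simp at this
        exact absurd this.symm (by intro hh; exact ht (by simp [hh]))
      · intro h; simp at h
  | cons a x' ih =>
    cases t with
    | nil =>
      simp only [List.nil_append]
      constructor
      · intro h
        rcases h with ⟨r, hr⟩
        have := congrArg (·.head?) hr
        simp at this
        exact absurd this (by intro hh; exact hx (by simp [hh]))
      · intro h; simp at h
    | cons c t' =>
      have hx' : '"' ∉ x' := fun h => hx (List.mem_cons_of_mem _ h)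
      have ht' : '"' ∉ t' := fun h => ht (List.mem_cons_of_mem _ h)
      constructor
      · intro h
        have hh := (List.cons_prefix_cons).mp (by simpa using h)
        have := (ih hx' ht').mp hh.2
        rw [hh.1, this]
      · intro h
        rw [h]
        rcases h' : c :: t' with _ | _
        · simp at h'
        · rw [← h']
          have : c :: t' ++ '"' :: m = ((c :: t') ++ ['"']) ++ m := by simp
          rw [this]
          exact List.prefix_append _ _

-- ---- segment-space devices ----
def pvW (rest : List (List Char)) : List Char := (rest.map (fun s => '"' :: s)).flatten

def pvMapInit (f : List Char → List Char) : List (List Char) → List (List Char)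
  | [] => []
  | [s] => [s]
  | s :: t :: r => f s :: pvMapInit f (t :: r)

def pvNoRun (x : List Char) : List (List Char) → Prop
  | t :: u :: r => (r ≠ [] → ¬(t = x ∧ u = x)) ∧ pvNoRun x (u :: r)
  | _ => True

def pvF (x y s : List Char) : List Char := if s = x then y else s

def pvCompF : List (List Char × List Char) → List Char → List Char
  | [], s => s
  | p :: ps, s => pvCompF ps (pvF p.1 p.2 s)

lemma pvW_cons (s : List Char) (rest : List (List Char)) :
    pvW (s :: rest) = '"' :: (s ++ pvW rest) := by
  simp [pvW]

lemma pvNoRun_tail {x : List Char} {t : List Char} {r : List (List Char)}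
    (h : pvNoRun x (t :: r)) : pvNoRun x r := by
  cases r with
  | nil => trivial
  | cons u r' => exact h.2

lemma pass_tail (x y : List Char) (hxq : '"' ∉ x) :
    ∀ (n : Nat) (rest : List (List Char)), rest.length ≤ n →
      (∀ s ∈ rest, '"' ∉ s) → pvNoRun x rest →
      pvSub ('"' :: (x ++ ['"'])) ('"' :: (y ++ ['"'])) (pvW rest)
        = pvW (pvMapInit (pvF x y) rest) := by
  intro n
  induction n with
  | zero =>
    intro rest hlen _ _
    have : rest = [] := List.eq_nil_of_length_eq_zero (Nat.le_zero.mp hlen)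
    subst this
    rfl
  | succ n ih =>
    intro rest hlen hq hnr
    cases rest with
    | nil => rfl
    | cons t rest' =>
      have hqt : '"' ∉ t := hq t (by simp)
      cases rest' with
      | nil =>
        rw [pvW_cons]
        have hpre : ¬ PySem.Chars.startswith ('"' :: (t ++ pvW [])) ('"' :: (x ++ ['"'])) = true := by
          simp only [PySem.Chars.startswith_iff]
          intro hp
          have := (List.cons_prefix_cons).mp hp
          exact qfree_no_prefix hqt (by simpa [pvW] using this.2)
        rw [pvSub_cons_neg _ hpre]
        simp only [pvW, List.map_nil, List.flatten_nil, List.append_nil] at *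
        rw [pvSub_qfree_id _ t hqt]
        simp [pvMapInit]
      | cons u r =>
        have hqu : '"' ∉ u := hq u (by simp)
        have hqr : ∀ s ∈ r, '"' ∉ s := fun s hs => hq s (by simp [hs])
        have hW : pvW (t :: u :: r) = '"' :: (t ++ '"' :: (u ++ pvW r)) := by
          rw [pvW_cons, pvW_cons]
        by_cases hteq : t = x
        · -- match at the head quote
          subst hteq
          have hpre : PySem.Chars.startswith ('"' :: (t ++ '"' :: (u ++ pvW r))) ('"' :: (t ++ ['"'])) = true := by
            simp only [PySem.Chars.startswith_iff]
            exact List.cons_prefix_cons.mpr ⟨rfl, (qfree_prefix_iff _ hqt hqt).mpr rfl⟩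
          rw [hW, pvSub_cons_pos _ hpre]
          have hdrop : (t ++ '"' :: (u ++ pvW r)).drop (('"' :: (t ++ ['"'])).length - 1)
              = u ++ pvW r := by
            have h1 : t ++ '"' :: (u ++ pvW r) = (t ++ ['"']) ++ (u ++ pvW r) := by simp
            have h2 : ('"' :: (t ++ ['"'])).length - 1 = (t ++ ['"']).length := by simp
            rw [h1, h2, List.drop_left]
          rw [hdrop]
          cases r with
          | nil =>
            rw [pvSub_qfree_id _ _ (by simpa [pvW] using hqu)]
            simp [pvMapInit, pvF, pvW]
          | cons r0 r' =>
            have hune : u ≠ t := by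
              intro h
              exact (hnr.1 (by simp)) ⟨rfl, h.symm ▸ rfl⟩
            rw [pvSub_skip _ u _ hqu]
            have hWr : pvW (r0 :: r') = '"' :: (r0 ++ pvW r') := pvW_cons _ _
            rw [ih (r0 :: r') (by simp at hlen ⊢; omega) hqr
              (pvNoRun_tail (x := t) (hnr.2))]
            simp only [pvMapInit, pvF, if_neg hune]
            rw [pvW_cons, pvW_cons]
            simp
        · -- no match at the head quote
          have hpre : ¬ PySem.Chars.startswith ('"' :: (t ++ '"' :: (u ++ pvW r))) ('"' :: (x ++ ['"'])) = true := by
            simp only [PySem.Chars.startswith_iff]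
            intro hp
            have := (List.cons_prefix_cons).mp hp
            exact hteq ((qfree_prefix_iff _ hxq hqt).mp this.2).symm
          rw [hW, pvSub_cons_neg _ hpre, pvSub_skip _ t _ hqt]
          have : '"' :: (u ++ pvW r) = pvW (u :: r) := (pvW_cons _ _).symm
          rw [this, ih (u :: r) (by simp at hlen ⊢; omega) (fun s hs => hq s (by simp [hs]))
            (pvNoRun_tail (x := x) hnr)]
          simp only [pvMapInit, pvF, if_neg hteq]
          rw [pvW_cons]

lemma pvMapInit_qfree {f : List Char → List Char} (hf : ∀ z, '"' ∉ z → '"' ∉ f z) :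
    ∀ (l : List (List Char)), (∀ z ∈ l, '"' ∉ z) → ∀ z ∈ pvMapInit f l, '"' ∉ z := by
  intro l
  induction l with
  | nil => intro _ z hz; simp [pvMapInit] at hz
  | cons t r ih =>
    intro hq z hz
    cases r with
    | nil =>
      simp only [pvMapInit, List.mem_singleton] at hz
      subst hz; exact hq z (by simp)
    | cons u r' =>
      simp only [pvMapInit, List.mem_cons] at hz
      rcases hz with hz | hz
      · subst hz; exact hf t (hq t (by simp))
      · exact ih (fun v hv => hq v (by simp [hv])) z (by simpa [pvMapInit] using hz)

lemma pvNoRun_mapInit {f : List Char → List Char} {x : List Char} (hf : ∀ s, f s = x → s = x) :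
    ∀ (l : List (List Char)), pvNoRun x l → pvNoRun x (pvMapInit f l) := by
  intro l
  induction l with
  | nil => intro _; trivial
  | cons t r ih =>
    intro h
    cases r with
    | nil => simp [pvMapInit]; trivial
    | cons u r' =>
      have hrec := ih h.2
      simp only [pvMapInit]
      cases r' with
      | nil =>
        simp only [pvMapInit] at hrec ⊢
        exact ⟨by simp, hrec⟩
      | cons v r'' =>
        refine ⟨?_, by simpa [pvMapInit] using hrec⟩
        intro hne ⟨h1, h2⟩
        exact (h.1 (by simp)) ⟨hf t h1, hf u (by simpa [pvMapInit] using h2)⟩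

lemma pvMapInit_id : ∀ (l : List (List Char)), pvMapInit (fun s => s) l = l := by
  intro l
  induction l with
  | nil => rfl
  | cons t r ih =>
    cases r with
    | nil => rfl
    | cons u r' => simpa [pvMapInit] using ih

lemma pvMapInit_comp (f g : List Char → List Char) :
    ∀ (l : List (List Char)), pvMapInit g (pvMapInit f l) = pvMapInit (fun s => g (f s)) l := by
  intro l
  induction l with
  | nil => rfl
  | cons t r ih =>
    cases r with
    | nil => rfl
    | cons u r' =>
      cases r' with
      | nil => rfl
      | cons v r'' => simpa [pvMapInit] using ih

lemma multi_pass : ∀ (pairs : List (List Char × List Char)) (s0 : List Char) (rest : List (List Char)),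
    (∀ p ∈ pairs, '"' ∉ p.1) → (∀ p ∈ pairs, '"' ∉ p.2) →
    (∀ p ∈ pairs, ∀ q ∈ pairs, q.2 ≠ p.1) →
    (∀ p ∈ pairs, pvNoRun p.1 rest) →
    '"' ∉ s0 → (∀ s ∈ rest, '"' ∉ s) →
    pairs.foldl (fun l p => pvSub ('"' :: (p.1 ++ ['"'])) ('"' :: (p.2 ++ ['"'])) l) (s0 ++ pvW rest)
      = s0 ++ pvW (pvMapInit (pvCompF pairs) rest) := by
  intro pairs
  induction pairs with
  | nil =>
    intro s0 rest _ _ _ _ _ _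
    simp [pvCompF, pvMapInit_id]
  | cons p ps ih =>
    intro s0 rest hk hv hfresh hnr hs0 hq
    simp only [List.foldl_cons]
    rw [pvSub_skip _ s0 _ hs0,
      pass_tail p.1 p.2 (hk p (by simp)) rest.length rest le_rfl hq (hnr p (by simp))]
    rw [ih s0 (pvMapInit (pvF p.1 p.2) rest)
      (fun r hr => hk r (by simp [hr]))
      (fun r hr => hv r (by simp [hr]))
      (fun r hr q hq' => hfresh r (by simp [hr]) q (by simp [hq']))
      (fun r hr => pvNoRun_mapInit (f := pvF p.1 p.2) (x := r.1)
        (by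
          intro s hfs
          by_cases hsx : s = p.1
          · exact absurd (by rw [← hfs]; simp [pvF, hsx]) (hfresh r (by simp [hr]) p (by simp))
          · simpa [pvF, hsx] using hfs)
        rest (hnr r (by simp [hr])))
      hs0
      (pvMapInit_qfree (f := pvF p.1 p.2)
        (by intro s hs; by_cases hsx : s = p.1 <;> simp [pvF, hsx, hv p (by simp), hs]) rest hq)]
    rw [pvMapInit_comp]
    rfl

lemma pvNoRun_of_not_infix (x : List Char) :
    ∀ (rest : List (List Char)),
      ¬ (('"' :: (x ++ '"' :: (x ++ ['"']))) <:+: pvW rest) → pvNoRun x rest := by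
  intro rest
  induction rest with
  | nil => intro _; trivial
  | cons t r ih =>
    intro h
    cases r with
    | nil => trivial
    | cons u r' =>
      refine ⟨?_, ?_⟩
      · rintro hne ⟨h1, h2⟩
        cases r' with
        | nil => exact hne rfl
        | cons v r'' =>
          apply h
          apply List.IsPrefix.isInfix
          refine ⟨v ++ pvW r'', ?_⟩
          rw [pvW_cons, pvW_cons, pvW_cons, h1, h2]
          simp
      · apply ih
        intro hinf
        exact h (hinf.trans (by rw [pvW_cons]; exact (List.suffix_append _ _).isInfix))

def qsplit : List Char → List (List Char)
  | [] => [[]]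
  | c :: rest =>
    if c = '"' then [] :: qsplit rest
    else match qsplit rest with
      | [] => [[c]]
      | p :: ps => (c :: p) :: ps

lemma qsplit_spec : ∀ (l : List Char), ∃ s0 rest, qsplit l = s0 :: rest ∧
    l = s0 ++ pvW rest ∧ '"' ∉ s0 ∧ (∀ s ∈ rest, '"' ∉ s) := by
  intro l
  induction l with
  | nil => exact ⟨[], [], rfl, by simp [pvW], by simp, by simp⟩
  | cons c m ih =>
    obtain ⟨s0, rest, hq, hrec, hs0, hr⟩ := ih
    by_cases hc : c = '"'
    · refine ⟨[], s0 :: rest, by simp [qsplit, hc, hq], ?_, by simp, ?_⟩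
      · rw [pvW_cons, ← hrec, hc]
        simp
      · intro s hs
        rcases List.mem_cons.mp hs with h | h
        · subst h; exact hs0
        · exact hr s h
    · refine ⟨c :: s0, rest, ?_, by simp [hrec], by simp [hs0, Ne.symm hc], hr⟩
      simp only [qsplit, if_neg hc, hq]

lemma go_spec : ∀ (fuel : Nat) (l cur : List Char) (acc : List (List Char)), l.length < fuel →
    PySem.Chars.splitOn.go ['"'] fuel l cur acc
      = acc.reverse ++ (cur.reverse ++ (qsplit l).headD []) :: (qsplit l).tail := by
  intro fuel
  induction fuel with
  | zero => intro l cur acc h; omega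
  | succ fuel ih =>
    intro l cur acc h
    cases l with
    | nil =>
      simp [PySem.Chars.splitOn.go, qsplit]
    | cons c rest =>
      by_cases hc : c = '"'
      · have hpre : ['"'].isPrefixOf (c :: rest) = true := by simp [hc, List.isPrefixOf]
        rw [PySem.Chars.splitOn.go]
        rw [if_pos hpre]
        simp only [List.length_singleton, List.drop_succ_cons, List.drop_zero]
        rw [ih rest [] (cur.reverse :: acc) (by simp at h; omega)]
        obtain ⟨s0, r, hq, -, -, -⟩ := qsplit_spec rest
        simp [qsplit, hc, hq]
      · have hpre : ['"'].isPrefixOf (c :: rest) = false := by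
          simp [List.isPrefixOf]
          exact fun hh => absurd hh.symm hc
        rw [PySem.Chars.splitOn.go]
        rw [if_neg (by simp [hpre])]
        rw [ih rest (c :: cur) acc (by simp at h; omega)]
        obtain ⟨s0, r, hq, -, -, -⟩ := qsplit_spec rest
        simp [qsplit, hc, hq]

lemma splitOn_eq_qsplit (l : List Char) : PySem.Chars.splitOn l ['"'] = qsplit l := by
  unfold PySem.Chars.splitOn
  rw [go_spec (l.length + 1) l [] [] (by omega)]
  obtain ⟨s0, r, hq, -, -, -⟩ := qsplit_spec l
  simp [hq]

def pvInterior (g : List Char → List Char) : List (List Char) → List (List Char)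
  | [] => []
  | s0 :: rest => s0 :: pvMapInit g rest

lemma join_eq (s0 : List Char) (rest : List (List Char)) :
    PySem.Chars.join ['"'] (s0 :: rest) = s0 ++ pvW rest := by
  induction rest generalizing s0 with
  | nil => simp [PySem.Chars.join_singleton, pvW]
  | cons t r ih =>
    rw [PySem.Chars.join_cons_cons, ih t, pvW_cons]
    simp

lemma loop_aux (g : List Char → List Char) (ps : List (List Char)) :
    ∀ (k : Nat), 1 ≤ k → k + 1 ≤ ps.length →
      (PySem.List.pyRange 1 (k : Int) 1).foldl
        (fun acc i => acc.set i.toNat (g (acc.getD i.toNat []))) ps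
      = ps.take 1 ++ ((ps.drop 1).take (k-1)).map g ++ ps.drop k := by
  intro k hk1
  induction k, hk1 using Nat.le_induction with
  | base =>
    intro _
    have h0 : PySem.List.pyRange 1 ((1:Nat) : Int) 1 = [] := by decide
    rw [h0]
    simp only [List.foldl_nil, Nat.sub_self, List.take_zero, List.map_nil]
    conv_lhs => rw [← List.take_append_drop 1 ps]
    simp
  | succ k hk ih =>
    intro hk2
    have hn : k + 2 ≤ ps.length := by omega
    have hrange : PySem.List.pyRange 1 (((k+1 : Nat)) : Int) 1
        = PySem.List.pyRange 1 (k : Int) 1 ++ [(k : Int)] := by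
      push_cast
      exact PySem.List.pyRange_one_succ_right (by exact_mod_cast hk)
    rw [hrange, List.foldl_append, ih (by omega)]
    simp only [List.foldl_cons, List.foldl_nil]
    set A := ps.take 1 with hA
    set B := ((ps.drop 1).take (k-1)).map g with hB
    have hlen' : (A ++ B).length = k := by
      simp only [List.length_append, hA, hB, List.length_take, List.length_map, List.length_drop]
      omega
    have hkn : k < ps.length := by omega
    have hdropk : ps.drop k = ps[k] :: ps.drop (k+1) := List.drop_eq_getElem_cons hkn
    have htoNat : ((k : Int)).toNat = k := by simp
    have hassoc : A ++ B ++ ps.drop k = (A ++ B) ++ ps.drop k := rfl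
    have hget : ((A ++ B) ++ ps.drop k).getD k [] = ps[k] := by
      rw [List.getD_eq_getElem?_getD, List.getElem?_append_right (by omega), hlen',
        Nat.sub_self, hdropk]
      rfl
    have hset : ((A ++ B) ++ ps.drop k).set k (g ps[k]) = (A ++ B) ++ (g ps[k] :: ps.drop (k+1)) := by
      rw [List.set_append_right _ _ (by omega), hlen', Nat.sub_self, hdropk]
      rfl
    have hgetd : (ps.drop 1)[k-1]? = some ps[k] := by
      rw [List.getElem?_drop]
      have e : 1 + (k - 1) = k := by omega
      rw [e]
      exact List.getElem?_eq_getElem hkn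
    have hB' : ((ps.drop 1).take (k+1-1)).map g = B ++ [g ps[k]] := by
      have e1 : k + 1 - 1 = (k-1)+1 := by omega
      rw [e1, List.take_add_one, List.map_append, hgetd]
      rfl
    rw [hassoc, htoNat, hget, hset, hB']
    simp [List.append_assoc]

lemma mapInit_take_drop (g : List Char → List Char) :
    ∀ (rest : List (List Char)), rest ≠ [] →
      pvMapInit g rest = (rest.take (rest.length - 1)).map g ++ rest.drop (rest.length - 1) := by
  intro rest
  induction rest with
  | nil => intro h; exact absurd rfl h
  | cons t r ih =>
    intro _
    cases r with
    | nil => simp [pvMapInit]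
    | cons u r' =>
      have := ih (by simp)
      simp only [pvMapInit, List.length_cons]
      have e : u :: r' ≠ [] := by simp
      rw [this]
      have e2 : r'.length + 1 + 1 - 1 = r'.length + 1 := by omega
      have e3 : (u :: r').length - 1 = r'.length := by simp
      rw [e2, e3] at *
      simp

lemma loop_eq (g : List Char → List Char) (ps : List (List Char)) :
    (PySem.List.pyRange 1 ((ps.length : Int) - 1) 1).foldl
      (fun acc i => acc.set i.toNat (g (acc.getD i.toNat []))) ps = pvInterior g ps := by
  cases ps with
  | nil =>
    have : PySem.List.pyRange 1 (((List.length ([] : List (List Char))) : Int) - 1) 1 = [] := by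
      simp only [List.length_nil]
      decide
    rw [this]
    rfl
  | cons s0 rest =>
    cases rest with
    | nil =>
      have : PySem.List.pyRange 1 (((List.length [s0]) : Int) - 1) 1 = [] := by
        simp only [List.length_singleton]
        decide
      rw [this]
      rfl
    | cons t r =>
      have hlen : ((List.length (s0 :: t :: r) : Int) - 1) = ((r.length + 2 - 1 : Nat) : Int) := by
        simp only [List.length_cons]
        push_cast
        ring
      rw [hlen, loop_aux g _ (r.length + 2 - 1) (by omega) (by simp)]
      have e1 : (s0 :: t :: r).take 1 = [s0] := rfl
      have e2 : (s0 :: t :: r).drop 1 = t :: r := rfl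
      have e3 : r.length + 2 - 1 - 1 = (t :: r).length - 1 := by simp
      have e4 : (s0 :: t :: r).drop (r.length + 2 - 1) = (t :: r).drop ((t :: r).length - 1) := by
        have : r.length + 2 - 1 = ((t :: r).length - 1) + 1 := by simp
        rw [this, List.drop_succ_cons]
      rw [e1, e2, e3, e4]
      have hmi := mapInit_take_drop g (t :: r) (by simp)
      simp [pvInterior, hmi]

def pvPairs : List (List Char × List Char) :=
  [("gpt-4".toList, "mock-gpt-4".toList),
   ("gpt-3.5-turbo".toList, "mock-gpt-3.5".toList),
   ("gpt-4o-mini".toList, "mock-gpt-4o-mini".toList),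
   ("claude-3-opus".toList, "mock-claude-opus".toList),
   ("claude-3-sonnet".toList, "mock-claude-sonnet".toList),
   ("claude-3-5-sonnet-20241022".toList, "mock-claude-sonnet".toList),
   ("claude-3-haiku".toList, "mock-claude-haiku".toList),
   ("claude-3-5-haiku-20241022".toList, "mock-claude-haiku".toList),
   ("claude-opus-4-1".toList, "mock-claude-opus".toList),
   ("gemini-pro".toList, "mock-gemini-pro".toList)]

lemma lookup_eq : ∀ s : List Char, pvModels.getD s s = pvCompF pvPairs s := by
  intro s
  by_cases h1 : s = ['g', 'p', 't', '-', '4']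
  · subst h1; decide
  by_cases h2 : s = ['g', 'p', 't', '-', '3', '.', '5', '-', 't', 'u', 'r', 'b', 'o']
  · subst h2; decide
  by_cases h3 : s = ['g', 'p', 't', '-', '4', 'o', '-', 'm', 'i', 'n', 'i']
  · subst h3; decide
  by_cases h4 : s = ['c', 'l', 'a', 'u', 'd', 'e', '-', '3', '-', 'o', 'p', 'u', 's']
  · subst h4; decide
  by_cases h5 : s = ['c', 'l', 'a', 'u', 'd', 'e', '-', '3', '-', 's', 'o', 'n', 'n', 'e', 't']
  · subst h5; decide
  by_cases h6 : s = ['c', 'l', 'a', 'u', 'd', 'e', '-', '3', '-', '5', '-', 's', 'o', 'n', 'n', 'e', 't', '-', '2', '0', '2', '4', '1', '0', '2', '2']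
  · subst h6; decide
  by_cases h7 : s = ['c', 'l', 'a', 'u', 'd', 'e', '-', '3', '-', 'h', 'a', 'i', 'k', 'u']
  · subst h7; decide
  by_cases h8 : s = ['c', 'l', 'a', 'u', 'd', 'e', '-', '3', '-', '5', '-', 'h', 'a', 'i', 'k', 'u', '-', '2', '0', '2', '4', '1', '0', '2', '2']
  · subst h8; decide
  by_cases h9 : s = ['c', 'l', 'a', 'u', 'd', 'e', '-', 'o', 'p', 'u', 's', '-', '4', '-', '1']
  · subst h9; decide
  by_cases h10 : s = ['g', 'e', 'm', 'i', 'n', 'i', '-', 'p', 'r', 'o']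
  · subst h10; decide
  have b1 : (['g', 'p', 't', '-', '4'] == s) = false := beq_eq_false_iff_ne.mpr (Ne.symm h1)
  have b2 : (['g', 'p', 't', '-', '3', '.', '5', '-', 't', 'u', 'r', 'b', 'o'] == s) = false := beq_eq_false_iff_ne.mpr (Ne.symm h2)
  have b3 : (['g', 'p', 't', '-', '4', 'o', '-', 'm', 'i', 'n', 'i'] == s) = false := beq_eq_false_iff_ne.mpr (Ne.symm h3)
  have b4 : (['c', 'l', 'a', 'u', 'd', 'e', '-', '3', '-', 'o', 'p', 'u', 's'] == s) = false := beq_eq_false_iff_ne.mpr (Ne.symm h4)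
  have b5 : (['c', 'l', 'a', 'u', 'd', 'e', '-', '3', '-', 's', 'o', 'n', 'n', 'e', 't'] == s) = false := beq_eq_false_iff_ne.mpr (Ne.symm h5)
  have b6 : (['c', 'l', 'a', 'u', 'd', 'e', '-', '3', '-', '5', '-', 's', 'o', 'n', 'n', 'e', 't', '-', '2', '0', '2', '4', '1', '0', '2', '2'] == s) = false := beq_eq_false_iff_ne.mpr (Ne.symm h6)
  have b7 : (['c', 'l', 'a', 'u', 'd', 'e', '-', '3', '-', 'h', 'a', 'i', 'k', 'u'] == s) = false := beq_eq_false_iff_ne.mpr (Ne.symm h7)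
  have b8 : (['c', 'l', 'a', 'u', 'd', 'e', '-', '3', '-', '5', '-', 'h', 'a', 'i', 'k', 'u', '-', '2', '0', '2', '4', '1', '0', '2', '2'] == s) = false := beq_eq_false_iff_ne.mpr (Ne.symm h8)
  have b9 : (['c', 'l', 'a', 'u', 'd', 'e', '-', 'o', 'p', 'u', 's', '-', '4', '-', '1'] == s) = false := beq_eq_false_iff_ne.mpr (Ne.symm h9)
  have b10 : (['g', 'e', 'm', 'i', 'n', 'i', '-', 'p', 'r', 'o'] == s) = false := beq_eq_false_iff_ne.mpr (Ne.symm h10)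
  simp [pvModels, pvPairs, PySem.Dict.getD, PySem.Dict.get?, pvCompF, pvF, List.find?,
    h1, h2, h3, h4, h5, h6, h7, h8, h9, h10,
    b1, b2, b3, b4, b5, b6, b7, b8, b9, b10]

lemma pvMapInit_congr (f g : List Char → List Char) (h : ∀ s, f s = g s) :
    ∀ l, pvMapInit f l = pvMapInit g l := by
  intro l
  induction l with
  | nil => rfl
  | cons t r ih =>
    cases r with
    | nil => rfl
    | cons u r' => simp only [pvMapInit, h t]; rw [show pvMapInit f (u :: r') = pvMapInit g (u :: r') from ih]

theorem pv_main (code : String) (hpre : Pre_prepare_code_for_testing code) :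
    prepare_code_for_testing code = prepare_code_for_testing_alt code := by
  unfold Pre_prepare_code_for_testing at hpre
  obtain ⟨hd1, hd2, hd3, hd4, hd5, hd6, hd7, hd8, hd9, hd10⟩ := hpre
  obtain ⟨s0, rest, hq, hrecon, hs0, hr⟩ := qsplit_spec code.toList
  have hWsuf : ∀ {pat : List Char}, pat <:+: pvW rest → pat <:+: code.toList := by
    intro pat hinf
    refine hinf.trans ?_
    rw [hrecon]
    exact (List.suffix_append _ _).isInfix
  have noRunOf : ∀ x : List Char,
      ¬ (('"' :: (x ++ '"' :: (x ++ ['"']))) <:+: code.toList) → pvNoRun x rest :=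
    fun x hx => pvNoRun_of_not_infix x rest (fun hinf => hx (hWsuf hinf))
  have nr1 : pvNoRun ("gpt-4".toList) rest := by
    refine noRunOf _ (fun hinf => ?_)
    have hT : PySem.Str.isIn "\"gpt-4\"gpt-4\"" code = true := by
      rw [PySem.Str.isIn_iff_infix]
      rw [show ("\"gpt-4\"gpt-4\"" : String).toList
          = '"' :: ("gpt-4".toList ++ '"' :: ("gpt-4".toList ++ ['"'])) from by decide]
      exact hinf
    rw [hd1] at hT
    exact absurd hT (by decide)
  have nr2 : pvNoRun ("gpt-3.5-turbo".toList) rest := by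
    refine noRunOf _ (fun hinf => ?_)
    have hT : PySem.Str.isIn "\"gpt-3.5-turbo\"gpt-3.5-turbo\"" code = true := by
      rw [PySem.Str.isIn_iff_infix]
      rw [show ("\"gpt-3.5-turbo\"gpt-3.5-turbo\"" : String).toList
          = '"' :: ("gpt-3.5-turbo".toList ++ '"' :: ("gpt-3.5-turbo".toList ++ ['"'])) from by decide]
      exact hinf
    rw [hd2] at hT
    exact absurd hT (by decide)
  have nr3 : pvNoRun ("gpt-4o-mini".toList) rest := by
    refine noRunOf _ (fun hinf => ?_)
    have hT : PySem.Str.isIn "\"gpt-4o-mini\"gpt-4o-mini\"" code = true := by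
      rw [PySem.Str.isIn_iff_infix]
      rw [show ("\"gpt-4o-mini\"gpt-4o-mini\"" : String).toList
          = '"' :: ("gpt-4o-mini".toList ++ '"' :: ("gpt-4o-mini".toList ++ ['"'])) from by decide]
      exact hinf
    rw [hd3] at hT
    exact absurd hT (by decide)
  have nr4 : pvNoRun ("claude-3-opus".toList) rest := by
    refine noRunOf _ (fun hinf => ?_)
    have hT : PySem.Str.isIn "\"claude-3-opus\"claude-3-opus\"" code = true := by
      rw [PySem.Str.isIn_iff_infix]
      rw [show ("\"claude-3-opus\"claude-3-opus\"" : String).toList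
          = '"' :: ("claude-3-opus".toList ++ '"' :: ("claude-3-opus".toList ++ ['"'])) from by decide]
      exact hinf
    rw [hd4] at hT
    exact absurd hT (by decide)
  have nr5 : pvNoRun ("claude-3-sonnet".toList) rest := by
    refine noRunOf _ (fun hinf => ?_)
    have hT : PySem.Str.isIn "\"claude-3-sonnet\"claude-3-sonnet\"" code = true := by
      rw [PySem.Str.isIn_iff_infix]
      rw [show ("\"claude-3-sonnet\"claude-3-sonnet\"" : String).toList
          = '"' :: ("claude-3-sonnet".toList ++ '"' :: ("claude-3-sonnet".toList ++ ['"'])) from by decide]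
      exact hinf
    rw [hd5] at hT
    exact absurd hT (by decide)
  have nr6 : pvNoRun ("claude-3-5-sonnet-20241022".toList) rest := by
    refine noRunOf _ (fun hinf => ?_)
    have hT : PySem.Str.isIn "\"claude-3-5-sonnet-20241022\"claude-3-5-sonnet-20241022\"" code = true := by
      rw [PySem.Str.isIn_iff_infix]
      rw [show ("\"claude-3-5-sonnet-20241022\"claude-3-5-sonnet-20241022\"" : String).toList
          = '"' :: ("claude-3-5-sonnet-20241022".toList ++ '"' :: ("claude-3-5-sonnet-20241022".toList ++ ['"'])) from by decide]
      exact hinf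
    rw [hd6] at hT
    exact absurd hT (by decide)
  have nr7 : pvNoRun ("claude-3-haiku".toList) rest := by
    refine noRunOf _ (fun hinf => ?_)
    have hT : PySem.Str.isIn "\"claude-3-haiku\"claude-3-haiku\"" code = true := by
      rw [PySem.Str.isIn_iff_infix]
      rw [show ("\"claude-3-haiku\"claude-3-haiku\"" : String).toList
          = '"' :: ("claude-3-haiku".toList ++ '"' :: ("claude-3-haiku".toList ++ ['"'])) from by decide]
      exact hinf
    rw [hd7] at hT
    exact absurd hT (by decide)
  have nr8 : pvNoRun ("claude-3-5-haiku-20241022".toList) rest := by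
    refine noRunOf _ (fun hinf => ?_)
    have hT : PySem.Str.isIn "\"claude-3-5-haiku-20241022\"claude-3-5-haiku-20241022\"" code = true := by
      rw [PySem.Str.isIn_iff_infix]
      rw [show ("\"claude-3-5-haiku-20241022\"claude-3-5-haiku-20241022\"" : String).toList
          = '"' :: ("claude-3-5-haiku-20241022".toList ++ '"' :: ("claude-3-5-haiku-20241022".toList ++ ['"'])) from by decide]
      exact hinf
    rw [hd8] at hT
    exact absurd hT (by decide)
  have nr9 : pvNoRun ("claude-opus-4-1".toList) rest := by
    refine noRunOf _ (fun hinf => ?_)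
    have hT : PySem.Str.isIn "\"claude-opus-4-1\"claude-opus-4-1\"" code = true := by
      rw [PySem.Str.isIn_iff_infix]
      rw [show ("\"claude-opus-4-1\"claude-opus-4-1\"" : String).toList
          = '"' :: ("claude-opus-4-1".toList ++ '"' :: ("claude-opus-4-1".toList ++ ['"'])) from by decide]
      exact hinf
    rw [hd9] at hT
    exact absurd hT (by decide)
  have nr10 : pvNoRun ("gemini-pro".toList) rest := by
    refine noRunOf _ (fun hinf => ?_)
    have hT : PySem.Str.isIn "\"gemini-pro\"gemini-pro\"" code = true := by
      rw [PySem.Str.isIn_iff_infix]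
      rw [show ("\"gemini-pro\"gemini-pro\"" : String).toList
          = '"' :: ("gemini-pro".toList ++ '"' :: ("gemini-pro".toList ++ ['"'])) from by decide]
      exact hinf
    rw [hd10] at hT
    exact absurd hT (by decide)
  have hnr : ∀ p ∈ pvPairs, pvNoRun p.1 rest := by
    intro p hp
    simp only [pvPairs, List.mem_cons, List.not_mem_nil, or_false] at hp
    rcases hp with h|h|h|h|h|h|h|h|h|h <;> subst h <;>
      first
      | exact nr1
      | exact nr2
      | exact nr3
      | exact nr4
      | exact nr5
      | exact nr6
      | exact nr7
      | exact nr8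
      | exact nr9
      | exact nr10
  have hfold : pvModelItems.foldl (fun l p => pvSub p.1.toList p.2.toList l) code.toList
      = pvPairs.foldl (fun l p => pvSub ('"' :: (p.1 ++ ['"'])) ('"' :: (p.2 ++ ['"'])) l) code.toList := by
    simp only [pvModelItems, pvPairs, List.foldl_cons, List.foldl_nil]
    rw [show ("\"gpt-4\"" : String).toList = '"' :: ("gpt-4".toList ++ ['"']) from by decide]
    rw [show ("\"gpt-3.5-turbo\"" : String).toList = '"' :: ("gpt-3.5-turbo".toList ++ ['"']) from by decide]
    rw [show ("\"gpt-4o-mini\"" : String).toList = '"' :: ("gpt-4o-mini".toList ++ ['"']) from by decide]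
    rw [show ("\"claude-3-opus\"" : String).toList = '"' :: ("claude-3-opus".toList ++ ['"']) from by decide]
    rw [show ("\"claude-3-sonnet\"" : String).toList = '"' :: ("claude-3-sonnet".toList ++ ['"']) from by decide]
    rw [show ("\"claude-3-5-sonnet-20241022\"" : String).toList = '"' :: ("claude-3-5-sonnet-20241022".toList ++ ['"']) from by decide]
    rw [show ("\"claude-3-haiku\"" : String).toList = '"' :: ("claude-3-haiku".toList ++ ['"']) from by decide]
    rw [show ("\"claude-3-5-haiku-20241022\"" : String).toList = '"' :: ("claude-3-5-haiku-20241022".toList ++ ['"']) from by decide]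
    rw [show ("\"claude-opus-4-1\"" : String).toList = '"' :: ("claude-opus-4-1".toList ++ ['"']) from by decide]
    rw [show ("\"gemini-pro\"" : String).toList = '"' :: ("gemini-pro".toList ++ ['"']) from by decide]
    rw [show ("\"mock-gpt-4\"" : String).toList = '"' :: ("mock-gpt-4".toList ++ ['"']) from by decide]
    rw [show ("\"mock-gpt-3.5\"" : String).toList = '"' :: ("mock-gpt-3.5".toList ++ ['"']) from by decide]
    rw [show ("\"mock-gpt-4o-mini\"" : String).toList = '"' :: ("mock-gpt-4o-mini".toList ++ ['"']) from by decide]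
    rw [show ("\"mock-claude-opus\"" : String).toList = '"' :: ("mock-claude-opus".toList ++ ['"']) from by decide]
    rw [show ("\"mock-claude-sonnet\"" : String).toList = '"' :: ("mock-claude-sonnet".toList ++ ['"']) from by decide]
    rw [show ("\"mock-claude-haiku\"" : String).toList = '"' :: ("mock-claude-haiku".toList ++ ['"']) from by decide]
    rw [show ("\"mock-gemini-pro\"" : String).toList = '"' :: ("mock-gemini-pro".toList ++ ['"']) from by decide]
  have hM : (pvModelItems.foldl (fun s p => PySem.Str.replace s p.1 p.2) code).toList
      = s0 ++ pvW (pvMapInit (pvCompF pvPairs) rest) := by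
    rw [pv_foldl_replace pvModelItems code (by decide), hfold]
    rw [show code.toList = s0 ++ pvW rest from hrecon]
    exact multi_pass pvPairs s0 rest (by decide) (by decide) (by decide) hnr hs0 hr
  have hBmid : PySem.Chars.join "\"".toList
      ((PySem.List.pyRange 1 (((PySem.Chars.splitOn code.toList "\"".toList).length : Int) - 1) 1).foldl
        (fun ps i => ps.set i.toNat (pvModels.getD (ps.getD i.toNat []) (ps.getD i.toNat [])))
        (PySem.Chars.splitOn code.toList "\"".toList))
      = s0 ++ pvW (pvMapInit (pvCompF pvPairs) rest) := by
    rw [show ("\"" : String).toList = ['"'] from by decide]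
    rw [splitOn_eq_qsplit, hq]
    have hloop := loop_eq (fun z => pvModels.getD z z) (s0 :: rest)
    rw [show (PySem.List.pyRange 1 (((s0 :: rest).length : Int) - 1) 1).foldl
        (fun ps i => ps.set i.toNat (pvModels.getD (ps.getD i.toNat []) (ps.getD i.toNat []))) (s0 :: rest)
        = pvInterior (fun z => pvModels.getD z z) (s0 :: rest) from hloop]
    rw [show pvInterior (fun z => pvModels.getD z z) (s0 :: rest)
        = s0 :: pvMapInit (fun z => pvModels.getD z z) rest from rfl]
    rw [pvMapInit_congr _ _ lookup_eq rest]
    exact join_eq s0 _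
  apply String.toList_inj.mp
  unfold prepare_code_for_testing prepare_code_for_testing_alt
  simp only []
  rw [String.toList_ofList]
  set M := pvModelItems.foldl (fun s p => PySem.Str.replace s p.1 p.2) code with hMdef
  rw [show PySem.Chars.join "\"".toList
      ((PySem.List.pyRange 1 (((PySem.Chars.splitOn code.toList "\"".toList).length : Int) - 1) 1).foldl
        (fun ps i => ps.set i.toNat (pvModels.getD (ps.getD i.toNat []) (ps.getD i.toNat [])))
        (PySem.Chars.splitOn code.toList "\"".toList)) = M.toList from hBmid.trans hM.symm]
  rw [apply_ite String.toList]
  by_cases hg : PySem.Str.isIn "load_dataset(\"data/" M = true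
  · rw [if_pos hg]
    rw [PySem.Str.toList_replace, PySem.Str.toList_replace]
  · rw [if_neg hg]
    have hgM : ¬ ("load_dataset(\"data/".toList <:+: M.toList) := by
      have hfalse : PySem.Str.isIn "load_dataset(\"data/" M = false := by
        cases hb : PySem.Str.isIn "load_dataset(\"data/" M
        · rfl
        · exact absurd hb hg
      rw [PySem.Str.isIn_eq] at hfalse
      exact (PySem.Chars.isIn_eq_false_iff _ _).mp hfalse
    have h11 : ¬ ("load_dataset(\"data/qa_1000.json\")".toList <:+: M.toList) :=
      fun h => hgM ((List.IsPrefix.isInfix (by decide)).trans h)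
    have h12 : ¬ ("load_dataset(\"data/news_articles.json\")".toList <:+: M.toList) :=
      fun h => hgM ((List.IsPrefix.isInfix (by decide)).trans h)
    rw [pv_replace_eq_pvSub _ _ (by decide) M.toList, pvSub_id_of_not_infix _ _ _ h11]
    rw [pv_replace_eq_pvSub _ _ (by decide) M.toList, pvSub_id_of_not_infix _ _ _ h12]


-- ===== VERDICT =====
theorem prepare_code_for_testing_spec : Claim_equal_prepare_code_for_testing := by
  intro code _ hpre
  unfold Spec_prepare_code_for_testing
  exact pv_main code hpre
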